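-- pv_equiv track=rewrite | github.com/Zirkul/plugins | modules/integrations/sonarqube.py | find_cve_in_txt
-- ===== SOURCE A (Python) =====
-- def find_cve_in_txt(search_in):
--     try:
--         if not isinstance(search_in, str) or len(search_in) < 5:
--             return None
--         txt = search_in.lower().replace(" ", "")
--         ini = txt.find("cve-")
--         cve_id = ""
--         if ini != -1:
--             cve_done = False
--             while not cve_done:
--                 character = txt[ini]
--                 if character in "cve - 1234567890":
--                     cve_id = "{0}{1}".format(cve_id, character)
--                     ini += 1
--                     if ini >= len(txt):
--                         cve_done = True
--                 else:
--                     cve_done = True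
--         if cve_id != "":
--             cve_id = cve_id.replace(" ", "")
--             return str(cve_id).upper()
--     except Exception as e:
--         return None
--     return None
-- ===== SOURCE B (Python) =====
-- def find_cve_in_txt(search_in):
--     if not isinstance(search_in, str) or len(search_in) < 5:
--         return None
--     txt = search_in.lower().replace(" ", "")
--     _, sep, rest = txt.partition("cve-")
--     if not sep:
--         return None
--     end = len(rest)
--     for i, ch in enumerate(rest):
--         if ch not in "cve0123456789-":
--             end = i
--             break
--     return "CVE-" + rest[:end].upper()
-- ===== Notes on version B (the rewrite author's own statement) =====
-- stated objective: simpler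
-- what changed: Replaces A's stateful find+while pointer/flag scan that appends one character at a time with str.partition at the first marker occurrence plus a single first-bad-character index and one slice, dropping the cve_done flag, the per-character string formatting and the redundant trailing replace/str wrappers.
import Mathlib
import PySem

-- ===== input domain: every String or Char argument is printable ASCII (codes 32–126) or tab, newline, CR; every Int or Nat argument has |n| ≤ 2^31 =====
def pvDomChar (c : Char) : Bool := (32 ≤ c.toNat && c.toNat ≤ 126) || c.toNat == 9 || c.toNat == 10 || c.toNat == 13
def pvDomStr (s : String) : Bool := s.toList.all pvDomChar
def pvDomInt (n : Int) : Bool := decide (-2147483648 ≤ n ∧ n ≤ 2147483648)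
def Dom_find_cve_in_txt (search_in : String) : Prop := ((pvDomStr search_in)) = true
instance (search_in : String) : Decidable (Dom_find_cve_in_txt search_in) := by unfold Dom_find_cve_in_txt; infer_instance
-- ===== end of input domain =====

-- B replaces A's pointer/flag character scan with partition + first-bad-index slice (objective: simpler); return values proved equal.

-- ===== PORT A =====
-- the character class "cve - 1234567890" of A's while loop
def pvAClass : List Char := "cve - 1234567890".toList

-- A's `while not cve_done` loop; fuel = txt.length suffices since ini grows each step.
-- `none` = IndexError (caught by A's try/except, impossible here) or fuel exhaustion (proved unreachable).
def pvALoop (txt : List Char) : Nat → Int → List Char → Option (List Char)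
  | 0, _, _ => none
  | fuel+1, ini, cveId =>
    match PySem.List.pyGet? txt ini with
    | none => none
    | some character =>
      if PySem.Chars.isIn [character] pvAClass then
        let cveId' := cveId ++ [character]
        let ini' := ini + 1
        if ini' ≥ (txt.length : Int) then some cveId' else pvALoop txt fuel ini' cveId'
      else some cveId

def find_cve_in_txt (search_in : String) : Option String :=
  -- `isinstance(search_in, str)` always holds for a String argument
  if PySem.Str.len search_in < 5 then none else
  let txt := PySem.Chars.replace (PySem.Chars.lower search_in.toList) [' '] []
  let ini := PySem.Chars.find txt "cve-".toList
  let r : Option (List Char) := if ini ≠ -1 then pvALoop txt txt.length ini [] else some []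
  match r with
  | none => none
  | some cveId =>
    if cveId ≠ [] then
      some (String.ofList (PySem.Chars.upper (PySem.Chars.replace cveId [' '] [])))
    else none

-- ===== PORT B =====
-- the character class "cve0123456789-" of B's break test
def pvBClass : List Char := "cve0123456789-".toList

-- B's `for i, ch in enumerate(rest): if ch not in …: end = i; break` — some i = break at i, none = no break
def pvBScan : List Char → Nat → Option Nat
  | [], _ => none
  | ch :: tail, i => if PySem.Chars.isIn [ch] pvBClass then pvBScan tail (i+1) else some i

def find_cve_in_txt_alt (search_in : String) : Option String :=
  if PySem.Str.len search_in < 5 then none else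
  let txt := PySem.Chars.replace (PySem.Chars.lower search_in.toList) [' '] []
  -- str.partition("cve-") ported via Chars.find (split at the FIRST occurrence, exact); empty sep ↔ find = -1
  let i := PySem.Chars.find txt "cve-".toList
  if i = -1 then none else
  let rest := txt.drop (i.toNat + 4)
  let endIdx := (pvBScan rest 0).getD rest.length
  some (String.ofList ("CVE-".toList ++ PySem.Chars.upper (rest.take endIdx)))

-- ===== PRECONDITION & SPEC =====
def Spec_find_cve_in_txt (search_in : String) (out : Option String) : Prop := out = find_cve_in_txt_alt search_in
instance (search_in : String) (out : Option String) : Decidable (Spec_find_cve_in_txt search_in out) := by unfold Spec_find_cve_in_txt; infer_instance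

-- ===== CLAIM (what is proved, stated in full; the proofs are below) =====
def Claim_equal_find_cve_in_txt : Prop := ∀ (search_in : String), Dom_find_cve_in_txt search_in → Spec_find_cve_in_txt search_in (find_cve_in_txt search_in)

-- ===== LEMMAS AND PROOFS =====

-- `c in "…"` on a one-char string is list membership
theorem pv_isIn_singleton (c : Char) (l : List Char) : PySem.Chars.isIn [c] l = l.contains c := by
  cases h : l.contains c
  · simp only [List.contains_eq_mem, decide_eq_false_iff_not] at h
    rw [PySem.Chars.isIn_eq_false_iff]
    intro hin
    exact h (hin.subset (by simp))
  · simp only [List.contains_eq_mem, decide_eq_true_eq] at h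
    rw [PySem.Chars.isIn_iff_infix]
    obtain ⟨a, b, rfl⟩ := List.mem_iff_append.mp h
    exact ⟨a, b, by simp⟩

-- the two character classes agree away from ' '
theorem pv_class_agree (c : Char) (h : c ≠ ' ') :
    PySem.Chars.isIn [c] pvAClass = PySem.Chars.isIn [c] pvBClass := by
  rw [pv_isIn_singleton, pv_isIn_singleton]
  have ha : pvAClass = ['c','v','e',' ','-',' ','1','2','3','4','5','6','7','8','9','0'] := by decide
  have hb : pvBClass = ['c','v','e','0','1','2','3','4','5','6','7','8','9','-'] := by decide
  rw [ha, hb]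
  simp only [List.contains_eq_mem]
  by_cases hc : c ∈ (['c','v','e','0','1','2','3','4','5','6','7','8','9','-'] : List Char)
  · fin_cases hc <;> rfl
  · rw [decide_eq_false hc, decide_eq_false]
    intro hm
    apply hc
    fin_cases hm <;> simp_all

theorem pv_replace_go (o : Char) : ∀ (fuel : Nat) (l acc : List Char), l.length ≤ fuel →
    PySem.Chars.replace.go [o] [] fuel l acc = acc.reverse ++ l.filter (fun c => c ≠ o) := by
  intro fuel
  induction fuel with
  | zero =>
    intro l acc h
    have : l = [] := List.eq_nil_of_length_eq_zero (by omega)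
    subst this
    simp [PySem.Chars.replace.go]
  | succ n ih =>
    intro l acc h
    cases l with
    | nil => simp [PySem.Chars.replace.go]
    | cons c t =>
      rw [PySem.Chars.replace.go]
      by_cases hc : c = o
      · have hp : ([o].isPrefixOf (c :: t)) = true := by
          simp [List.isPrefixOf, hc]
        rw [hp]
        simp only [if_true, List.length_cons, List.length_nil, Nat.zero_add, List.drop_one,
          List.tail_cons, List.reverse_nil, List.nil_append]
        rw [ih t acc (by simpa using h)]
        simp [hc]
      · have hp : ([o].isPrefixOf (c :: t)) = false := by
          simp [List.isPrefixOf]; exact fun hh => absurd hh.symm hc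
        rw [hp]
        simp only [Bool.false_eq_true, if_false]
        rw [ih t (c :: acc) (by simpa using h)]
        simp [hc]

-- replace(old=' ', new='') is filtering the spaces out
theorem pv_replace_single_delete (o : Char) (l : List Char) :
    PySem.Chars.replace l [o] [] = l.filter (fun c => c ≠ o) := by
  rw [PySem.Chars.replace]
  simp only [List.isEmpty_cons, Bool.false_eq_true, if_false]
  simpa using pv_replace_go o l.length l [] le_rfl

-- A's loop collects exactly the run of class characters starting at ini
theorem pv_aLoop_takeWhile (txt : List Char) : ∀ (fuel ini : Nat) (acc : List Char),
    ini < txt.length → txt.length - ini ≤ fuel →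
    pvALoop txt fuel (ini : Int) acc =
      some (acc ++ (txt.drop ini).takeWhile (fun c => PySem.Chars.isIn [c] pvAClass)) := by
  intro fuel
  induction fuel with
  | zero => intro ini acc h1 h2; omega
  | succ n ih =>
    intro ini acc h1 h2
    rw [pvALoop]
    have hget : PySem.List.pyGet? txt (ini : Int) = some (txt[ini]) := by
      rw [PySem.List.pyGet?_natCast]
      exact List.getElem?_eq_getElem h1
    rw [hget]
    simp only
    rw [List.drop_eq_getElem_cons h1, List.takeWhile_cons]
    by_cases hc : PySem.Chars.isIn [txt[ini]] pvAClass = true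
    · rw [if_pos hc, if_pos hc]
      by_cases hend : ((ini : Int) + 1 ≥ (txt.length : Int))
      · have hlen : ini + 1 = txt.length := by omega
        rw [if_pos hend]
        have : txt.drop (ini + 1) = [] := List.drop_eq_nil_of_le (by omega)
        rw [this]
        simp
      · rw [if_neg hend]
        have hcast : (ini : Int) + 1 = ((ini + 1 : Nat) : Int) := by push_cast; ring
        rw [hcast, ih (ini + 1) (acc ++ [txt[ini]]) (by omega) (by omega)]
        simp
    · rw [if_neg hc, if_neg hc]
      simp

theorem pv_bScan_shift : ∀ (l : List Char) (i : Nat),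
    pvBScan l (i + 1) = (pvBScan l i).map (· + 1) := by
  intro l
  induction l with
  | nil => intro i; simp [pvBScan]
  | cons c t ih =>
    intro i
    rw [pvBScan, pvBScan]
    by_cases hc : PySem.Chars.isIn [c] pvBClass = true
    · rw [if_pos hc, if_pos hc, ih]
    · rw [if_neg hc, if_neg hc, Option.map_some]

-- B's scan-then-slice is takeWhile
theorem pv_bScan_take (l : List Char) :
    l.take ((pvBScan l 0).getD l.length) = l.takeWhile (fun c => PySem.Chars.isIn [c] pvBClass) := by
  induction l with
  | nil => simp [pvBScan]
  | cons c t ih =>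
    rw [pvBScan, List.takeWhile_cons]
    by_cases hc : PySem.Chars.isIn [c] pvBClass = true
    · rw [if_pos hc, if_pos hc]
      rw [show (0 : Nat) + 1 = 0 + 1 from rfl, pv_bScan_shift]
      cases hs : pvBScan t 0 with
      | none =>
        simp only [Option.map_none, Option.getD_none, List.length_cons, List.take_succ_cons]
        rw [← ih, hs]
        simp
      | some j =>
        simp only [Option.map_some, Option.getD_some, List.take_succ_cons]
        rw [← ih, hs]
        simp
    · rw [if_neg hc, if_neg hc]
      simp

-- takeWhile only looks at predicate values on the list's own elements
theorem pv_takeWhile_congr {p q : Char → Bool} : ∀ (l : List Char), (∀ c ∈ l, p c = q c) →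
    l.takeWhile p = l.takeWhile q := by
  intro l
  induction l with
  | nil => intro _; rfl
  | cons c t ih =>
    intro h
    rw [List.takeWhile_cons, List.takeWhile_cons, h c (by simp),
      ih (fun d hd => h d (by simp [hd]))]

-- ===== VERDICT (by name: the statement is the Claim_ definition above) =====
theorem find_cve_in_txt_spec : Claim_equal_find_cve_in_txt := by
  intro s _
  unfold Spec_find_cve_in_txt find_cve_in_txt find_cve_in_txt_alt
  by_cases h5 : PySem.Str.len s < 5
  · rw [if_pos h5, if_pos h5]
  rw [if_neg h5, if_neg h5]
  dsimp only
  set txt := PySem.Chars.replace (PySem.Chars.lower s.toList) [' '] [] with htxt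
  set k := PySem.Chars.find txt "cve-".toList with hk
  by_cases hkm : k = -1
  · rw [if_pos hkm, if_neg (by simp [hkm])]
    simp
  rw [if_neg hkm, if_pos (by simp [hkm])]
  -- k points at the first "cve-" in txt
  have hk0 : 0 ≤ k := by
    have := PySem.Chars.neg_one_le_find (s := txt) (sub := "cve-".toList)
    omega
  have hcve : "cve-".toList = ['c','v','e','-'] := by decide
  have hpre := (PySem.Chars.find_spec (s := txt) (sub := "cve-".toList) hk0).1
  rw [← hk] at hpre
  obtain ⟨rest, hd⟩ := hpre
  have hdrop : List.drop k.toNat txt = ['c','v','e','-'] ++ rest := by rw [← hd, hcve]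
  have hklen : k ≤ (txt.length : Int) := by rw [hk]; exact PySem.Chars.find_le_length txt "cve-".toList
  have hkl : k.toNat < txt.length := by
    have := congrArg List.length hdrop
    simp only [List.length_drop, List.length_append, List.length_cons] at this
    omega
  -- no spaces anywhere in txt
  have hsp : ∀ c ∈ txt, c ≠ ' ' := by
    intro c hc
    rw [htxt, pv_replace_single_delete] at hc
    simpa using (List.of_mem_filter hc)
  have hrest_sub : ∀ c ∈ rest, c ∈ txt := by
    intro c hc
    have : c ∈ List.drop k.toNat txt := by rw [hdrop]; simp [hc]
    exact List.mem_of_mem_drop this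
  -- A's loop result
  have hcast : k = ((k.toNat : Nat) : Int) := (Int.toNat_of_nonneg hk0).symm
  rw [hcast, pv_aLoop_takeWhile txt txt.length k.toNat [] hkl (by omega)]
  simp only [Int.toNat_natCast, List.nil_append]
  rw [hdrop]
  have htw4 : (['c','v','e','-'] ++ rest).takeWhile (fun c => PySem.Chars.isIn [c] pvAClass)
      = 'c' :: 'v' :: 'e' :: '-' :: rest.takeWhile (fun c => PySem.Chars.isIn [c] pvAClass) := by
    simp only [List.cons_append, List.nil_append, List.takeWhile_cons]
    norm_num [show PySem.Chars.isIn ['c'] pvAClass = true from by decide,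
      show PySem.Chars.isIn ['v'] pvAClass = true from by decide,
      show PySem.Chars.isIn ['e'] pvAClass = true from by decide,
      show PySem.Chars.isIn ['-'] pvAClass = true from by decide]
  rw [htw4]
  have htwAB : rest.takeWhile (fun c => PySem.Chars.isIn [c] pvAClass)
      = rest.takeWhile (fun c => PySem.Chars.isIn [c] pvBClass) :=
    pv_takeWhile_congr rest (fun c hc => pv_class_agree c (hsp c (hrest_sub c hc)))
  set run := rest.takeWhile (fun c => PySem.Chars.isIn [c] pvBClass) with hrun
  rw [htwAB]
  have hne : ('c' :: 'v' :: 'e' :: '-' :: run) ≠ [] := by simp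
  rw [if_pos hne]
  -- the collected id has no spaces, so the second replace is the identity
  have hcveid_nospace : ∀ c ∈ ('c' :: 'v' :: 'e' :: '-' :: run), (decide (c ≠ ' ')) = true := by
    intro c hc
    simp only [List.mem_cons] at hc
    rcases hc with rfl | rfl | rfl | rfl | hc
    · decide
    · decide
    · decide
    · decide
    · simpa using hsp c (hrest_sub c ((List.takeWhile_sublist _).subset (by rw [hrun] at hc; exact hc)))
  rw [pv_replace_single_delete, List.filter_eq_self.mpr hcveid_nospace]
  -- B's side: rest and the scan
  have hdrop4 : txt.drop (k.toNat + 4) = rest := by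
    have h3 := congrArg (List.drop 4) hdrop
    rw [List.drop_drop] at h3
    rw [show List.drop 4 (['c','v','e','-'] ++ rest) = rest from rfl] at h3
    simpa [Nat.add_comm] using h3
  rw [hdrop4, pv_bScan_take rest, ← hrun]
  -- uppercasing
  have hCVE : "CVE-".toList = ['C','V','E','-'] := by decide
  rw [hCVE]
  simp only [PySem.Chars.upper, List.map_cons, List.cons_append, List.nil_append]
  norm_num [show PySem.Chars.upperChar 'c' = 'C' from by decide,
    show PySem.Chars.upperChar 'v' = 'V' from by decide,
    show PySem.Chars.upperChar 'e' = 'E' from by decide,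
    show PySem.Chars.upperChar '-' = '-' from by decide]
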